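-- pv_equiv track=rewrite | github.com/nicwulab/HA_Abs | script/analyze_CDRH3_property.py | seqs2consensus
-- ===== SOURCE A (Python) =====
-- from collections import defaultdict, Counter
--
-- def seqs2consensus(seqlist, most_common_len):
--   consensus = ''
--   for n in range(most_common_len):
--     resi = []
--     for seq in seqlist:
--       if len(seq) == most_common_len:
--         resi.append(seq[n])
--     most_common,num_most_common = Counter(resi).most_common(1)[0]
--     consensus+=most_common
--   return consensus
-- ===== SOURCE B (Python) =====
-- from collections import Counter
--
-- def seqs2consensus(seqlist, most_common_len):
--     counters = [Counter() for _ in range(most_common_len)]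
--     for seq in seqlist:
--         if len(seq) == most_common_len:
--             for n, ch in enumerate(seq):
--                 counters[n][ch] += 1
--     return ''.join(c.most_common(1)[0][0] for c in counters)
-- ===== Notes on version B (the rewrite author's own statement) =====
-- stated objective: alternative
-- what changed: A rescans the whole sequence list once per position, building a fresh column list and Counter for each position; B makes a single pass over the sequences filling one table of per-column counters and then reads off each column's first-seen winner.
-- outside the precondition, e.g. on seqs2consensus(['ab'], 3): A raises IndexError, B raises IndexError
import Mathlib
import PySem

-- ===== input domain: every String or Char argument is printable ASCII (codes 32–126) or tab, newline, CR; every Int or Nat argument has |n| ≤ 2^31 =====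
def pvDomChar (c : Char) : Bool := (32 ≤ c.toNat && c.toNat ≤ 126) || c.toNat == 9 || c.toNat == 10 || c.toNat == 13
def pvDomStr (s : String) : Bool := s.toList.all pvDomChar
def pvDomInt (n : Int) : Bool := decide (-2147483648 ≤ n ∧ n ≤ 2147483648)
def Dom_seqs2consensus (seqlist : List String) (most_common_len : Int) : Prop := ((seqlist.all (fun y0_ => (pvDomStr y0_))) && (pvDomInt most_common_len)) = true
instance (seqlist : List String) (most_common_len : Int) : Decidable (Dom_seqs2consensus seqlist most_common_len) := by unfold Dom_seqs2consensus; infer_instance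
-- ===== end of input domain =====

-- B replaces A's per-position rescan of the whole sequence list by ONE pass that fills a
-- per-column count table, then a second pass reading off each column's winner (alternative decomposition).

-- ===== PORT A =====
-- A: for each position n, collect column chars from the sequences of the right length,
-- then Counter(...).most_common(1)[0] (first-seen tie-break = first extremal item).
def seqs2consensus (seqlist : List String) (most_common_len : Int) : String :=
  String.mk ((PySem.List.pyRange 0 most_common_len 1).foldl (fun consensus n =>
    let resi : List Char := seqlist.foldl (fun r seq =>
      if PySem.Str.len seq == most_common_len
      then r ++ [(PySem.Str.pyGet? seq n).getD ' ']   -- seq[n]; in range whenever len seq = most_common_len and n ∈ range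
      else r) []
    match PySem.List.max? (PySem.Dict.counter resi).items (fun p => p.2) with
    | some (c, _) => consensus ++ [c]                 -- consensus += most_common
    | none => consensus) [])                          -- empty Counter: Python raises IndexError (excluded by Pre_)

-- ===== PORT B =====
-- B: one table of per-column counters filled in a single pass, then winners read off.
def seqs2consensus_alt (seqlist : List String) (most_common_len : Int) : String :=
  let counters := seqlist.foldl (fun cs seq =>
      if PySem.Str.len seq == most_common_len then
        -- for n, ch in enumerate(seq): counters[n][ch] += 1   (len seq = len counters)
        List.zipWith (fun d ch => PySem.Dict.modify d ch 0 (· + 1)) cs seq.toList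
      else cs)
    ((PySem.List.pyRange 0 most_common_len 1).map (fun _ => (PySem.Dict.empty : PySem.Dict Char Int)))
  String.mk (counters.foldl (fun acc d =>
    match PySem.List.max? d.items (fun p => p.2) with
    | some (c, _) => acc ++ [c]
    | none => acc) [])

-- ===== PRECONDITION & SPEC =====
-- Pre_ excludes exactly the inputs where Python A raises IndexError (most_common_len > 0 but no
-- sequence of that length, so most_common(1)[0] hits an empty Counter); B raises there too.
def Pre_seqs2consensus (seqlist : List String) (most_common_len : Int) : Prop :=
  most_common_len ≤ 0 ∨ (seqlist.any (fun s => PySem.Str.len s == most_common_len)) = true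
instance (seqlist : List String) (most_common_len : Int) : Decidable (Pre_seqs2consensus seqlist most_common_len) := by unfold Pre_seqs2consensus; infer_instance
def pvWitness_seqs2consensus : List String × Int := (["ab", "cb", "xyz"], 2)

def Spec_seqs2consensus (seqlist : List String) (most_common_len : Int) (out : String) : Prop := out = seqs2consensus_alt seqlist most_common_len
instance (seqlist : List String) (most_common_len : Int) (out : String) : Decidable (Spec_seqs2consensus seqlist most_common_len out) := by unfold Spec_seqs2consensus; infer_instance

-- ===== CLAIM (what is proved, stated in full; the proofs are below) =====
def Claim_equal_seqs2consensus : Prop := ∀ (seqlist : List String) (most_common_len : Int), Dom_seqs2consensus seqlist most_common_len → Pre_seqs2consensus seqlist most_common_len → Spec_seqs2consensus seqlist most_common_len (seqs2consensus seqlist most_common_len)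

-- ===== LEMMAS AND PROOFS =====

-- the character A reads at column n of seq
def pvCharAt (s : String) (n : Int) : Char := (PySem.Str.pyGet? s n).getD ' '

-- zipWith over a mapped range = mapped range of pointwise application
theorem pv_zipWith_map_range {α : Type} (f : α → Char → α) (g : Nat → α) (cs : List Char) :
    List.zipWith f ((List.range cs.length).map g) cs
      = (List.range cs.length).map (fun k => f (g k) (cs.getD k ' ')) := by
  induction cs generalizing g with
  | nil => simp
  | cons c cs ih =>
    simp only [List.length_cons, List.range_succ_eq_map, List.map_cons, List.map_map,
      List.zipWith_cons_cons]
    rw [ih]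
    simp [Function.comp]

-- main invariant: after the single pass, B's counter table is, column by column,
-- the Counter of the column characters of the matching sequences seen so far
theorem pv_counters_eq (L : Int) (l : List String) :
    ∀ (g : Int → List Char),
    l.foldl (fun cs seq =>
        if PySem.Str.len seq == L then
          List.zipWith (fun d ch => PySem.Dict.modify d ch 0 (· + 1)) cs seq.toList
        else cs)
      ((PySem.List.pyRange 0 L 1).map (fun n => PySem.Dict.counter (g n)))
    = (PySem.List.pyRange 0 L 1).map (fun n =>
        PySem.Dict.counter (g n ++ (l.filter (fun s => PySem.Str.len s == L)).map (fun s => pvCharAt s n))) := by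
  induction l with
  | nil => intro g; simp
  | cons s l ih =>
    intro g
    simp only [List.foldl_cons, List.filter_cons]
    by_cases h : (PySem.Str.len s == L) = true
    · have hlen : s.toList.length = L.toNat := by
        have := PySem.Str.len_eq s
        have h' : PySem.Str.len s = L := by simpa using h
        omega
      have hstep : List.zipWith (fun d ch => PySem.Dict.modify d ch 0 (· + 1))
          ((PySem.List.pyRange 0 L 1).map (fun n => PySem.Dict.counter (g n))) s.toList
          = (PySem.List.pyRange 0 L 1).map (fun n => PySem.Dict.counter (g n ++ [pvCharAt s n])) := by
        rw [PySem.List.pyRange_one, Int.sub_zero, ← hlen]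
        simp only [List.map_map, Function.comp_def]
        rw [pv_zipWith_map_range (fun d ch => PySem.Dict.modify d ch 0 (· + 1))
          (fun k => PySem.Dict.counter (g (0 + (k : Int)))) s.toList]
        apply List.map_congr_left
        intro k hk
        have hk' : k < s.toList.length := by simpa using List.mem_range.mp hk
        rw [PySem.Dict.counter_append_singleton]
        congr 1
        show s.toList.getD k ' ' = pvCharAt s ((0 : Int) + (k : Int))
        unfold pvCharAt
        rw [zero_add, PySem.Str.pyGet?_natCast]
        simp [List.getD_eq_getElem?_getD]
      rw [h, if_pos rfl, hstep, ih (fun n => g n ++ [pvCharAt s n])]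
      simp
    · rw [if_neg (by simpa using h)]
      have hb : (PySem.Str.len s == L) = false := by simpa using h
      rw [hb]
      simp only [Bool.false_eq_true, if_false]
      exact ih g

theorem seqs2consensus_total_eq (seqlist : List String) (L : Int) :
    seqs2consensus seqlist L = seqs2consensus_alt seqlist L := by
  unfold seqs2consensus seqs2consensus_alt
  have hinit : ((PySem.List.pyRange 0 L 1).map (fun _ => (PySem.Dict.empty : PySem.Dict Char Int)))
      = (PySem.List.pyRange 0 L 1).map (fun n => PySem.Dict.counter ((fun _ => ([] : List Char)) n)) := rfl
  rw [hinit, pv_counters_eq L seqlist (fun _ => [])]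
  simp only [List.foldl_map, PySem.List.foldl_append_if, List.nil_append, pvCharAt]

-- ===== VERDICT (by name: the statement is the Claim_ definition above) =====
theorem seqs2consensus_spec : Claim_equal_seqs2consensus := by
  intro seqlist most_common_len _ _
  show seqs2consensus seqlist most_common_len = seqs2consensus_alt seqlist most_common_len
  exact seqs2consensus_total_eq seqlist most_common_len
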